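-- pv_equiv track=rewrite | github.com/AliMuhammadAsad/Grad-Chronicles | CS412-Algorithms/Spring22/Weekly-Challenge-01/code_w1.py | find_updates
-- ===== SOURCE A (Python) =====
-- def find_updates(x):
--     m = max(x)
--     if x[-1] == m:
--         return 0
--     L = 0
--     current = x[-1]
--     index = -1
--     while (current != m):
--         index-=1
--         if current < x[index]:
--             current = x[index]
--             L+=1
--     return L
-- ===== SOURCE B (Python) =====
-- def find_updates(x):
--     return sum(1 for i in range(len(x) - 1) if x[i] > max(x[i + 1:]))
-- ===== Notes on version B (the rewrite author's own statement) =====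
-- stated objective: simpler
-- what changed: Replaces A's stateful backward scan (running max, stop-at-max, negative index walking) with a one-line declarative count of the indices whose element strictly exceeds the maximum of its suffix.
import Mathlib
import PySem

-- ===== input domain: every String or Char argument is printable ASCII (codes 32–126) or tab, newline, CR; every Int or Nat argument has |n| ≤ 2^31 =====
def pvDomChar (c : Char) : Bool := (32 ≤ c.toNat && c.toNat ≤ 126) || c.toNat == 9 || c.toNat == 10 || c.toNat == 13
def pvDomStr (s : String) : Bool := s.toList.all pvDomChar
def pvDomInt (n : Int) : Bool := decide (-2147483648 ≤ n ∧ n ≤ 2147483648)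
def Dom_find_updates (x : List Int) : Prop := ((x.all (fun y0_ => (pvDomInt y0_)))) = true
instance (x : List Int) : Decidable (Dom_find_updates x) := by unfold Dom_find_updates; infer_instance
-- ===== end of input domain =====

-- B replaces A's stateful backward scan with a declarative count of indices whose
-- element strictly exceeds the maximum of its suffix (simpler, not faster).


-- ===== PORT A =====
-- the while loop: state (current, index, L); fuel x.length bounds the iterations
-- (index walks from -1 down, at most to -len, one step per iteration)
def pvLoopA (x : List Int) (m : Int) : Int → Int → Int → Nat → Int
  | _, _, L, 0 => L
  | current, index, L, Nat.succ fuel =>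
    if current ≠ m then
      match PySem.List.pyGet? x (index - 1) with
      | none => L  -- IndexError; never reached on the inputs A accepts
      | some v =>
        if current < v then pvLoopA x m v (index - 1) (L + 1) fuel
        else pvLoopA x m current (index - 1) L fuel
    else L

def find_updates (x : List Int) : Int :=
  match PySem.List.max? x (fun y => y) with
  | none => 0  -- max([]) raises ValueError; excluded by Pre_
  | some m =>
    match PySem.List.pyGet? x (-1) with
    | none => 0  -- unreachable: x nonempty here
    | some last =>
      if last = m then 0
      else pvLoopA x m last (-1) 0 x.length

-- ===== PORT B =====
def find_updates_alt (x : List Int) : Int :=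
  (PySem.List.pyRange 0 ((x.length : Int) - 1) 1).foldl (fun acc i =>
    match PySem.List.pyGet? x i,
          PySem.List.max? (PySem.List.slice x (some (i + 1)) none) (fun y => y) with
    | some v, some mx => if mx < v then acc + 1 else acc
    | _, _ => acc) 0

-- ===== PRECONDITION & SPEC =====
-- Pre_ excludes only the empty list, on which A's max(x) raises ValueError.
def Pre_find_updates (x : List Int) : Prop := x ≠ []
instance (x : List Int) : Decidable (Pre_find_updates x) := by unfold Pre_find_updates; infer_instance
def pvWitness_find_updates : List Int := ([3, 1, 2])

def Spec_find_updates (x : List Int) (out : Int) : Prop := out = find_updates_alt x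
instance (x : List Int) (out : Int) : Decidable (Spec_find_updates x out) := by unfold Spec_find_updates; infer_instance

-- ===== CLAIM (what is proved, stated in full; the proofs are below) =====
def Claim_equal_find_updates : Prop := ∀ (x : List Int), Dom_find_updates x → Pre_find_updates x → Spec_find_updates x (find_updates x)

-- ===== LEMMAS AND PROOFS =====

-- number of strict records after the first position, scanning left to right with running max c
def pvGo (c : Int) : List Int → Int
  | [] => 0
  | b :: t => if c < b then 1 + pvGo b t else pvGo c t

-- max of a nonempty list (0 on [])
def pvMaxD : List Int → Int
  | [] => 0
  | a :: t => t.foldl max a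

-- B's count, structurally: #\{i < n-1 | x[i] > max x[i+1:]\}
def pvCnt : List Int → Int
  | [] => 0
  | [_] => 0
  | a :: b :: t => (if pvMaxD (b :: t) < a then 1 else 0) + pvCnt (b :: t)

theorem pvFoldlMaxInit (l : List Int) : ∀ b a : Int, l.foldl max (max b a) = max (l.foldl max b) a := by
  induction l with
  | nil => intro b a; rfl
  | cons d u ih =>
    intro b a
    simp only [List.foldl_cons]
    rw [max_right_comm b a d, ih]

theorem pvFoldlMaxRev (l : List Int) : ∀ a : Int, l.foldl max a = l.reverse.foldl max a := by
  induction l with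
  | nil => intro a; rfl
  | cons b t ih =>
    intro a
    simp only [List.foldl_cons, List.reverse_cons, List.foldl_append, List.foldl_cons, List.foldl_nil]
    rw [ih (max a b), ← pvFoldlMaxInit, max_comm a b, pvFoldlMaxInit]

theorem pvFoldlMax_of_mem (l : List Int) : ∀ a : Int, a ∈ l → l.foldl max a = pvMaxD l := by
  cases l with
  | nil => intro a h; cases h
  | cons hd tl =>
    intro a h
    simp only [List.foldl_cons, pvMaxD]
    rcases List.mem_cons.mp h with rfl | h
    · rw [max_self]
    · rw [max_comm, pvFoldlMaxInit]
      exact max_eq_left ((PySem.List.le_foldl_max tl hd).2 a h)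

theorem pvMaxD_rev (l : List Int) : pvMaxD l.reverse = pvMaxD l := by
  cases l with
  | nil => rfl
  | cons hd tl =>
    have h1 : pvMaxD (hd :: tl) = (hd :: tl).foldl max hd := by
      simp [pvMaxD, List.foldl_cons, max_self]
    have h2 : (hd :: tl).reverse.foldl max hd = pvMaxD (hd :: tl).reverse :=
      pvFoldlMax_of_mem _ hd (by simp)
    rw [h1, pvFoldlMaxRev, h2]

theorem pvGo_eq_zero (l : List Int) : ∀ c : Int, (∀ y ∈ l, y ≤ c) → pvGo c l = 0 := by
  induction l with
  | nil => intro c _; rfl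
  | cons b t ih =>
    intro c h
    have hb : b ≤ c := h b (by simp)
    simp only [pvGo, if_neg (not_lt.mpr hb)]
    exact ih c (fun y hy => h y (List.mem_cons_of_mem _ hy))

theorem pvGo_snoc (s : List Int) : ∀ c a : Int, pvGo c (s ++ [a]) = pvGo c s + (if s.foldl max c < a then 1 else 0) := by
  induction s with
  | nil => intro c a; simp [pvGo]
  | cons d u ih =>
    intro c a
    simp only [List.cons_append, pvGo, List.foldl_cons]
    by_cases h : c < d
    · simp only [if_pos h, ih d a, max_eq_right h.le]; ring
    · simp only [if_neg h, ih c a, max_eq_left (not_lt.mp h)]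

-- pvCnt x = records of x.reverse
theorem pvCnt_eq_go (x : List Int) : ∀ (c : Int) (s : List Int), x.reverse = c :: s → pvCnt x = pvGo c s := by
  induction x with
  | nil => intro c s h; simp at h
  | cons a t ih =>
    intro c s h
    cases t with
    | nil =>
      simp only [List.reverse_cons, List.reverse_nil, List.nil_append, List.cons.injEq] at h
      obtain ⟨rfl, rfl⟩ := h
      rfl
    | cons b t' =>
      obtain ⟨c', s', hrev⟩ := List.exists_cons_of_ne_nil (l := (b :: t').reverse) (by simp)
      have hx : (a :: b :: t').reverse = c' :: (s' ++ [a]) := by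
        simp [hrev]
      rw [hx] at h
      obtain ⟨rfl, rfl⟩ := List.cons_eq_cons.mp h
      have hmax : pvMaxD (b :: t') = s'.foldl max c' := by
        rw [← pvMaxD_rev (b :: t'), hrev]; rfl
      simp only [pvCnt, hmax, ih c' s' hrev, pvGo_snoc s' c' a]
      ring

-- ===== A side =====

theorem pvLoopA_eq (x : List Int) (m : Int) (l : List Int) : ∀ (c L : Int) (k fuel : Nat),
    x.reverse.drop (k + 1) = l → k + 1 ≤ x.length → l.length ≤ fuel →
    m = l.foldl max c →
    pvLoopA x m c (-((k : Int) + 1)) L fuel = L + pvGo c l := by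
  induction l with
  | nil =>
    intro c L k fuel _ _ _ hm
    have hcm : c = m := by simp [hm]
    cases fuel with
    | zero => simp [pvLoopA, pvGo]
    | succ f => simp [pvLoopA, hcm, pvGo]
  | cons b t ih =>
    intro c L k fuel hdrop hk hfuel hm
    have hlen : k + 1 < x.reverse.length := by
      by_contra hc
      rw [List.drop_eq_nil_of_le (le_of_not_gt (by simpa using hc))] at hdrop
      exact (List.cons_ne_nil b t) hdrop.symm
    have hxlen : k + 2 ≤ x.length := by simpa using hlen
    by_cases hcm : c = m
    · -- current already equals the max: loop exits; records count is 0
      have hzero : pvGo c (b :: t) = 0 := by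
        apply pvGo_eq_zero
        intro y hy
        calc y ≤ (b :: t).foldl max c := (PySem.List.le_foldl_max (b :: t) c).2 y hy
          _ = c := by rw [← hm, hcm]
      cases fuel with
      | zero => simp at hfuel
      | succ f => subst hcm; simp [pvLoopA, hzero]
    · cases fuel with
      | zero => simp at hfuel
      | succ f =>
        have hidx : -((k : Int) + 1) - 1 = -((k + 2 : Nat) : Int) := by push_cast; ring
        have hget : PySem.List.pyGet? x (-((k + 2 : Nat) : Int)) = some b := by
          rw [PySem.List.pyGet?_neg_natCast x (k + 2) (by omega) hxlen]
          have h1 : x.length - (k + 2) = x.length - 1 - (k + 1) := by omega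
          rw [h1, ← List.getElem?_reverse (by simpa using hlen)]
          simpa [List.head?_drop] using congrArg List.head? hdrop
        have hb : x.reverse.drop (k + 1 + 1) = t := by
          have := congrArg List.tail hdrop
          simpa [List.tail_drop] using this
        simp only [pvLoopA, if_pos hcm, hidx, hget]
        by_cases hcb : c < b
        · rw [if_pos hcb]
          have hm' : m = t.foldl max b := by
            rw [hm]; simp [List.foldl_cons, max_eq_right hcb.le]
          have := ih b (L + 1) (k + 1) f hb (by omega) (by simp only [List.length_cons] at hfuel; omega) hm'
          rw [show -((((k+1:Nat)):Int) + 1) = -((k+2:Nat):Int) by push_cast; ring] at this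
          rw [this]
          simp only [pvGo, if_pos hcb]; ring
        · rw [if_neg hcb]
          have hm' : m = t.foldl max c := by
            rw [hm]; simp [List.foldl_cons, max_eq_left (not_lt.mp hcb)]
          have := ih c L (k + 1) f hb (by omega) (by simp only [List.length_cons] at hfuel; omega) hm'
          rw [show -((((k+1:Nat)):Int) + 1) = -((k+2:Nat):Int) by push_cast; ring] at this
          rw [this]
          simp only [pvGo, if_neg hcb]

-- ===== B side =====

-- the step function of B's foldl, on a natural index
def pvStep (x : List Int) (acc : Int) (k : Nat) : Int :=
  match x[k]?, PySem.List.max? (x.drop (k + 1)) (fun y => y) with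
  | some v, some mx => if mx < v then acc + 1 else acc
  | _, _ => acc

theorem pvStep_foldl (x : List Int) : ∀ acc : Int, (List.range (x.length - 1)).foldl (pvStep x) acc = acc + pvCnt x := by
  induction x with
  | nil => intro acc; simp [pvCnt]
  | cons a t ih =>
    intro acc
    cases t with
    | nil => simp [pvCnt]
    | cons b t' =>
      have hlen : (a :: b :: t').length - 1 = (b :: t').length - 1 + 1 := by simp
      rw [hlen, List.range_succ_eq_map, List.foldl_cons, List.foldl_map]
      have hstep : ∀ (acc : Int) (k : Nat), pvStep (a :: b :: t') acc (k + 1) = pvStep (b :: t') acc k := by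
        intro acc k
        simp [pvStep, List.getElem?_cons_succ, List.drop_succ_cons]
      have h0 : pvStep (a :: b :: t') acc 0 = acc + (if pvMaxD (b :: t') < a then 1 else 0) := by
        simp only [pvStep, List.getElem?_cons_zero, List.drop_succ_cons, List.drop_zero,
          PySem.List.max?_id_cons, pvMaxD]
        split <;> simp
      calc (List.range ((b :: t').length - 1)).foldl (fun acc k => pvStep (a :: b :: t') acc (k + 1)) (pvStep (a :: b :: t') acc 0)
          = (List.range ((b :: t').length - 1)).foldl (pvStep (b :: t')) (pvStep (a :: b :: t') acc 0) :=
            PySem.List.foldl_congr_mem _ _ _ _ (fun acc k _ => hstep acc k)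
        _ = pvStep (a :: b :: t') acc 0 + pvCnt (b :: t') := ih _
        _ = acc + pvCnt (a :: b :: t') := by rw [h0, pvCnt]; ring

theorem find_updates_alt_eq (x : List Int) : find_updates_alt x = pvCnt x := by
  unfold find_updates_alt
  rw [PySem.List.pyRange_one, List.foldl_map]
  have hcast : ((x.length : Int) - 1 - 0).toNat = x.length - 1 := by omega
  rw [hcast]
  have hbody : ∀ (acc : Int) (k : Nat), k < x.length - 1 →
      (match PySem.List.pyGet? x (0 + (k : Int)),
             PySem.List.max? (PySem.List.slice x (some (0 + (k : Int) + 1)) none) (fun y => y) with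
       | some v, some mx => if mx < v then acc + 1 else acc
       | _, _ => acc) = pvStep x acc k := by
    intro acc k _
    have h1 : (0 : Int) + (k : Int) = ((k : Nat) : Int) := by ring
    rw [h1]
    rw [show ((k : Nat) : Int) + 1 = (((k + 1 : Nat)) : Int) by push_cast; ring]
    rw [PySem.List.pyGet?_natCast, PySem.List.slice_from_natCast]
    rfl
  exact (PySem.List.foldl_congr_mem _ _ (pvStep x) 0
    (fun acc k hk => hbody acc k (List.mem_range.mp hk))).trans ((pvStep_foldl x 0).trans (zero_add _))

-- ===== main equivalence =====

theorem pv_main (x : List Int) (hx : x ≠ []) : find_updates x = find_updates_alt x := by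
  obtain ⟨a, t, rfl⟩ := List.exists_cons_of_ne_nil hx
  obtain ⟨last, rest, hrev⟩ := List.exists_cons_of_ne_nil (l := (a :: t).reverse) (by simp)
  have hmax : PySem.List.max? (a :: t) (fun y => y) = some (pvMaxD (a :: t)) := by
    rw [PySem.List.max?_id_cons]; rfl
  have hlast : PySem.List.pyGet? (a :: t) (-1) = some last := by
    rw [PySem.List.pyGet?_neg_one]
    rw [← List.head?_reverse, hrev]; rfl
  have hm_rev : pvMaxD (a :: t) = rest.foldl max last := by
    rw [← pvMaxD_rev (a :: t), hrev]; rfl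
  rw [find_updates_alt_eq, pvCnt_eq_go (a :: t) last rest hrev]
  have hfu : find_updates (a :: t) = if last = pvMaxD (a :: t) then 0
      else pvLoopA (a :: t) (pvMaxD (a :: t)) last (-1) 0 (a :: t).length := by
    unfold find_updates
    simp only [hmax, hlast]
  rw [hfu]
  by_cases hlm : last = pvMaxD (a :: t)
  · rw [if_pos hlm]
    symm
    apply pvGo_eq_zero
    intro y hy
    calc y ≤ rest.foldl max last := (PySem.List.le_foldl_max rest last).2 y hy
      _ = last := by rw [← hm_rev, hlm]
  · rw [if_neg hlm]
    have hdrop : (a :: t).reverse.drop 1 = rest := by rw [hrev]; rfl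
    have := pvLoopA_eq (a :: t) (pvMaxD (a :: t)) rest last 0 0 (a :: t).length
      (by simpa using hdrop) (by simp) ?_ hm_rev
    · simpa using this
    · have : rest.length + 1 = (a :: t).length := by
        have := congrArg List.length hrev
        simpa [Nat.add_comm] using this.symm
      omega

-- ===== VERDICT (by name: the statement is the Claim_ definition above) =====
theorem find_updates_spec : Claim_equal_find_updates := by
  intro x _ hpre
  unfold Spec_find_updates
  exact pv_main x hpre
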